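-- pv_equiv track=rewrite | github.com/rahulsamant37/DSA_Python | basic/017_dynamic_programming/005_coin_change.py | coin_change_with_fees
-- ===== SOURCE A (Python) =====
-- from typing import List, Dict, Tuple, Optional
--
-- def coin_change_with_fees(coins: List[int], fees: List[int], amount: int) -> int:
--     """
--     Coin change with transaction fees for each coin type
--
--     Args:
--         coins: List of coin denominations
--         fees: Transaction fee for each coin type
--         amount: Target amount
--
--     Returns:
--         Minimum total cost (coins + fees)
--     """
--     dp = [float('inf')] * (amount + 1)
--     dp[0] = 0
--
--     for i, coin in enumerate(coins):
--         fee = fees[i]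
--         for j in range(coin, amount + 1):
--             if dp[j - coin] != float('inf'):
--                 dp[j] = min(dp[j], dp[j - coin] + coin + fee)
--
--     return dp[amount] if dp[amount] != float('inf') else -1
-- ===== SOURCE B (Python) =====
-- def coin_change_with_fees(coins, fees, amount):
--     # Top-down memoized evaluation of the minimum total cost, driven by an
--     # explicit post-order DFS stack (so no recursion depth limit applies):
--     # a value is computed only after all of its sub-amounts are memoized.
--     # Non-positive denominations can never contribute to making an amount,
--     # so they are dropped up front (see the stated intended difference for
--     # the zero-coin-with-negative-fee corner of the original).
--     items = [(c, c + f) for c, f in zip(coins, fees) if c > 0]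
--     memo = {0: 0}
--     stack = [(amount, False)]
--     while stack:
--         rem, expanded = stack.pop()
--         if rem in memo:
--             continue
--         if not expanded:
--             stack.append((rem, True))
--             stack.extend((rem - c, False) for c, _ in items
--                          if c <= rem and rem - c not in memo)
--         else:
--             best = None
--             for c, cost in items:
--                 if c <= rem:
--                     sub = memo[rem - c]
--                     if sub is not None and (best is None or sub + cost < best):
--                         best = sub + cost
--             memo[rem] = best
--     res = memo[amount]
--     return res if res is not None else -1
-- ===== Notes on version B (the rewrite author's own statement) =====
-- stated objective: alternative
-- what changed: Replaces A's bottom-up dynamic program (a dense dp array over 0..amount relaxed in-place once per coin) by top-down memoized evaluation: an explicit post-order DFS stack expands only the sub-amounts actually reachable from `amount`, memoizes each in a dict after its children, and reads the answer from the memo.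
-- intended difference: On inputs whose coin list holds a zero denomination with a negative fee (and the amount is reachable from the positive denominations), A's forward pass adds that negative fee to every reachable dp entry without consuming any coin, returning the true minimum plus those spurious negative fees (e.g. -1 for coins=[0], fees=[-1], amount=0); B ignores denominations that cannot contribute and returns the true minimum cost (0 there), which is the intended value. — e.g. on coin_change_with_fees([0], [-1], 0): A returns -1, B returns 0
import Mathlib
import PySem

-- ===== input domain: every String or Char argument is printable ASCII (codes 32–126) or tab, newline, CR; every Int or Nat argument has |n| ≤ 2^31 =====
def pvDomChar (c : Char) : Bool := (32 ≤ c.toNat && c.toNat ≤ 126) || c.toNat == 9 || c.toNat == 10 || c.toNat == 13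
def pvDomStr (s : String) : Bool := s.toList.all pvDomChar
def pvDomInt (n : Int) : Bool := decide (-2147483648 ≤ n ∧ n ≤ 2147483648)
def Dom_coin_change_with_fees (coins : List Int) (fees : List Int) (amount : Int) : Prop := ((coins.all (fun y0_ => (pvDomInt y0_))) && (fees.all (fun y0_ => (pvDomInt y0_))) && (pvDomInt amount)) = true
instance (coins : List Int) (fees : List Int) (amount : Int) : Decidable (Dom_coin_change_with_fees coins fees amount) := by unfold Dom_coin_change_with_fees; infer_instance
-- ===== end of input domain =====

-- B replaces A's bottom-up per-coin relaxation sweeps over a dense dp array by top-down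
-- memoized evaluation driven by an explicit post-order DFS stack, which visits only the
-- sub-amounts reachable from `amount` (objective: alternative decomposition).

-- ===== PORT A =====
-- float('inf') is a pure sentinel here (all finite dp values are ints), ported exactly as `none`;
-- `min(dp[j], x)` with a possibly-infinite dp[j] is pvOmin.
def pvOmin (o : Option Int) (x : Int) : Option Int :=
  match o with
  | none => some x
  | some y => some (min y x)

-- the inner `for j in range(coin, amount + 1)` loop of A, one coin at a time
def pvPassA (amount : Int) (coin : Int) (fee : Int) (dp : List (Option Int)) : List (Option Int) :=
  (PySem.List.pyRange coin (amount + 1) 1).foldl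
    (fun dp j =>
      match (PySem.List.pyGet? dp (j - coin)).join with
      | none => dp
      | some v => dp.set j.toNat (pvOmin (PySem.List.pyGet? dp j).join (v + coin + fee)))
    dp

def coin_change_with_fees (coins : List Int) (fees : List Int) (amount : Int) : Int :=
  let dp0 := (List.replicate (amount + 1).toNat (none : Option Int)).set 0 (some 0)
  let dp := (PySem.List.enumerate coins 0).foldl
    (fun dp p => pvPassA amount p.2 ((PySem.List.pyGet? fees p.1).getD 0) dp) dp0
  match (PySem.List.pyGet? dp amount).join with
  | some v => v
  | none => -1

-- ===== PORT B =====
-- Fuel for the Lean transcription of B's while loop (the loop provably terminates: the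
-- measure pvMsum below strictly decreases each iteration and starts below this fuel).
def pvPsiTable (its : List (Int × Int)) : Nat → List Nat
  | 0 => [2]
  | n + 1 =>
    let t := pvPsiTable its n
    t ++ [2 + ((its.filter (fun p => decide (0 < p.1) && decide (p.1 ≤ (n : Int) + 1))).map
        (fun p => t.getD (n + 1 - p.1.toNat) 0)).sum]

def pvPsi (its : List (Int × Int)) (rem : Int) : Nat :=
  if 0 ≤ rem then (pvPsiTable its rem.toNat).getD rem.toNat 0 else 2

-- B's inner `for c, cost in items` best-candidate loop; `memo[rem - c]` is read via `.join`:
-- it is present whenever this runs (proved below), so this is exact.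
def pvBest (items : List (Int × Int)) (rem : Int) (memo : PySem.Dict Int (Option Int)) : Option Int :=
  items.foldl (fun best p =>
    if p.1 ≤ rem then
      match (memo.get? (rem - p.1)).join with
      | none => best
      | some s =>
        match best with
        | none => some (s + p.2)
        | some b => if s + p.2 < b then some (s + p.2) else best
    else best) none

-- B's while loop; the head of the list is the top of the Python stack (Python pops from the
-- end and `extend` appends, so the pending children are reversed onto the front here).
def pvEnsure (items : List (Int × Int)) : Nat → List (Int × Bool) → PySem.Dict Int (Option Int) → PySem.Dict Int (Option Int)
  | 0, _, memo => memo
  | _ + 1, [], memo => memo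
  | fuel + 1, (rem, expanded) :: stack, memo =>
    if (memo.get? rem).isSome then
      pvEnsure items fuel stack memo
    else if expanded = false then
      pvEnsure items fuel
        ((items.filterMap (fun p =>
            if p.1 ≤ rem ∧ (memo.get? (rem - p.1)).isNone then some (rem - p.1, false) else none)).reverse
          ++ (rem, true) :: stack) memo
    else
      pvEnsure items fuel stack (memo.insert rem (pvBest items rem memo))

def coin_change_with_fees_alt (coins : List Int) (fees : List Int) (amount : Int) : Int :=
  let items := ((coins.zip fees).filter (fun p => 0 < p.1)).map (fun p => (p.1, p.1 + p.2))
  let memo := pvEnsure items (pvPsi items amount + 1) [(amount, false)]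
      ((PySem.Dict.empty : PySem.Dict Int (Option Int)).insert 0 (some 0))
  match (memo.get? amount).join with
  | some v => v
  | none => -1

-- ===== PRECONDITION & SPEC =====
-- Pre_ excludes exactly the inputs on which A raises: a negative amount (dp[0] = 0 on an
-- empty list), fewer fees than coins (fees[i]), or a negative denomination (the inner loop
-- indexes dp[j - coin] past the end). A returns normally on everything admitted here.
def Pre_coin_change_with_fees (coins : List Int) (fees : List Int) (amount : Int) : Prop :=
  0 ≤ amount ∧ coins.length ≤ fees.length ∧ ∀ c ∈ coins, 0 ≤ c
instance (coins : List Int) (fees : List Int) (amount : Int) : Decidable (Pre_coin_change_with_fees coins fees amount) := by unfold Pre_coin_change_with_fees; infer_instance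

def pvWitness_coin_change_with_fees : List Int × List Int × Int := ([1, 2], [0, 1], 3)

-- reachability of n as a sum of (positive) denominations from cs, by a dp table
def pvReach (cs : List Int) (n : Nat) : Bool :=
  (Nat.rec [true] (fun m t =>
    t ++ [cs.any (fun c => decide (c ≤ m + 1) && t.getD (m + 1 - c.toNat) false)]) n : List Bool).getD n false

-- On inputs whose coin list holds a zero denomination with a negative fee (and the amount is
-- reachable from the positive denominations), A's forward pass adds that negative fee to every
-- reachable dp entry without consuming any coin and returns the true minimum plus those spurious
-- fees; B ignores denominations that cannot contribute and returns the true minimum cost, which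
-- is the intended value.
def D_coin_change_with_fees (coins : List Int) (fees : List Int) (amount : Int) : Prop :=
  (∃ p ∈ coins.zip fees, p.1 = 0 ∧ p.2 < 0) ∧ pvReach coins amount.toNat = true
instance (coins : List Int) (fees : List Int) (amount : Int) : Decidable (D_coin_change_with_fees coins fees amount) := by unfold D_coin_change_with_fees; infer_instance

def Spec_coin_change_with_fees (coins : List Int) (fees : List Int) (amount : Int) (out : Int) : Prop :=
  ¬ D_coin_change_with_fees coins fees amount → out = coin_change_with_fees_alt coins fees amount
instance (coins : List Int) (fees : List Int) (amount : Int) (out : Int) : Decidable (Spec_coin_change_with_fees coins fees amount out) := by unfold Spec_coin_change_with_fees; infer_instance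

def pvDiffWitness_coin_change_with_fees : List Int × List Int × Int := ([0], [-1], 0)
def pvDiffWitnessOut_coin_change_with_fees : Int × Int := (-1, 0)

-- ===== CLAIM (what is proved, stated in full; the proofs are below) =====
def Claim_unchanged_coin_change_with_fees : Prop := ∀ (coins : List Int) (fees : List Int) (amount : Int), Dom_coin_change_with_fees coins fees amount → Pre_coin_change_with_fees coins fees amount → Spec_coin_change_with_fees coins fees amount (coin_change_with_fees coins fees amount)
def Claim_changed_coin_change_with_fees : Prop := Dom_coin_change_with_fees (pvDiffWitness_coin_change_with_fees.1) (pvDiffWitness_coin_change_with_fees.2.1) (pvDiffWitness_coin_change_with_fees.2.2) ∧ Pre_coin_change_with_fees (pvDiffWitness_coin_change_with_fees.1) (pvDiffWitness_coin_change_with_fees.2.1) (pvDiffWitness_coin_change_with_fees.2.2) ∧ D_coin_change_with_fees (pvDiffWitness_coin_change_with_fees.1) (pvDiffWitness_coin_change_with_fees.2.1) (pvDiffWitness_coin_change_with_fees.2.2) ∧ coin_change_with_fees (pvDiffWitness_coin_change_with_fees.1) (pvDiffWitness_coin_change_with_fees.2.1) (pvDiffWitness_coin_change_with_fees.2.2)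 = pvDiffWitnessOut_coin_change_with_fees.1 ∧ coin_change_with_fees_alt (pvDiffWitness_coin_change_with_fees.1) (pvDiffWitness_coin_change_with_fees.2.1) (pvDiffWitness_coin_change_with_fees.2.2) = pvDiffWitnessOut_coin_change_with_fees.2 ∧ pvDiffWitnessOut_coin_change_with_fees.1 ≠ pvDiffWitnessOut_coin_change_with_fees.2
def Claim_exact_coin_change_with_fees : Prop := ∀ (coins : List Int) (fees : List Int) (amount : Int), Dom_coin_change_with_fees coins fees amount → Pre_coin_change_with_fees coins fees amount → D_coin_change_with_fees coins fees amount → coin_change_with_fees coins fees amount ≠ coin_change_with_fees_alt coins fees amount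

-- ===== LEMMAS AND PROOFS =====

-- ---- an Option Int ordered min-with-infinity (none = +∞; all dp values are finite ints) ----
def pvMin (a b : Option Int) : Option Int :=
  match a, b with
  | none, b => b
  | a, none => a
  | some x, some y => some (min x y)

def pvLe (a b : Option Int) : Prop :=
  match a, b with
  | _, none => True
  | none, some _ => False
  | some x, some y => x ≤ y

def pvM (l : List (Option Int)) : Option Int := l.foldr pvMin none

def pvItems (P : List (Int × Int)) : List (Int × Int) :=
  (P.filter (fun p => 0 < p.1)).map (fun p => (p.1, p.1 + p.2))

def pvOptTable (its : List (Int × Int)) : Nat → List (Option Int)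
  | 0 => [some 0]
  | n + 1 =>
    let t := pvOptTable its n
    t ++ [pvM (its.map (fun p =>
      if 0 < p.1 ∧ p.1 ≤ (n : Int) + 1 then (t.getD (n + 1 - p.1.toNat) none).map (fun v => v + p.2) else none))]

def pvOpt (its : List (Int × Int)) (n : Nat) : Option Int := (pvOptTable its n).getD n none

def pvZ (P : List (Int × Int)) : Int := ((P.filter (fun p => p.1 == 0)).map (fun p => min 0 p.2)).sum

def pvRep (P : List (Int × Int)) (j : Nat) : Option Int := (pvOpt (pvItems P) j).map (fun v => v + pvZ P)

theorem pvLe_refl (a : Option Int) : pvLe a a := by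
  cases a <;> simp [pvLe]
theorem pvLe_trans {a b c : Option Int} (h1 : pvLe a b) (h2 : pvLe b c) : pvLe a c := by
  cases a <;> cases b <;> cases c <;> simp [pvLe] at * <;> omega
theorem pvLe_antisymm {a b : Option Int} (h1 : pvLe a b) (h2 : pvLe b a) : a = b := by
  cases a <;> cases b <;> simp [pvLe] at * <;> omega
theorem pvMin_le_left (a b : Option Int) : pvLe (pvMin a b) a := by
  cases a <;> cases b <;> simp [pvLe, pvMin]
theorem pvMin_le_right (a b : Option Int) : pvLe (pvMin a b) b := by
  cases a <;> cases b <;> simp [pvLe, pvMin]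
theorem pvLe_min {a b c : Option Int} (h1 : pvLe c a) (h2 : pvLe c b) : pvLe c (pvMin a b) := by
  cases a <;> cases b <;> cases c <;> simp [pvLe, pvMin] at * <;> omega
theorem pvMin_none_right (a : Option Int) : pvMin a none = a := by
  cases a <;> simp [pvMin]
theorem pvAdd_mono {a b : Option Int} (w : Int) (h : pvLe a b) :
    pvLe (a.map (fun v => v + w)) (b.map (fun v => v + w)) := by
  cases a <;> cases b <;> simp [pvLe] at * <;> omega

theorem pvM_append_singleton (l : List (Option Int)) (x : Option Int) :
    pvM (l ++ [x]) = pvMin (pvM l) x := by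
  induction l with
  | nil => cases x <;> simp [pvM, pvMin]
  | cons y l ih =>
      simp only [pvM, List.cons_append, List.foldr_cons] at *
      rw [ih]
      cases y <;> cases x <;> cases (l.foldr pvMin none) <;> simp [pvMin] <;> omega
theorem pvM_le_of_mem {l : List (Option Int)} {a : Option Int} (h : a ∈ l) : pvLe (pvM l) a := by
  induction l with
  | nil => cases h
  | cons y l ih =>
      rcases List.mem_cons.mp h with rfl | h
      · exact pvMin_le_left _ _
      · exact pvLe_trans (pvMin_le_right y (pvM l)) (ih h)
theorem pvLe_M {l : List (Option Int)} {b : Option Int} (h : ∀ a ∈ l, pvLe b a) : pvLe b (pvM l) := by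
  induction l with
  | nil => cases b <;> simp [pvM, pvLe]
  | cons y l ih =>
      exact pvLe_min (h y (by simp)) (ih (fun a ha => h a (by simp [ha])))
theorem pvM_eq_none_iff (l : List (Option Int)) : pvM l = none ↔ ∀ a ∈ l, a = none := by
  induction l with
  | nil => simp [pvM]
  | cons y l ih =>
      show pvMin y (pvM l) = none ↔ _
      cases y <;> cases hm : pvM l <;>
        simp [pvMin, ← ih, hm] <;> intro h <;> exact absurd hm (by simp [h])

theorem pvOptTable_length (its : List (Int × Int)) (n : Nat) : (pvOptTable its n).length = n + 1 := by
  induction n with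
  | zero => rfl
  | succ n ih => simp [pvOptTable, ih]
theorem pvOptTable_getD (its : List (Int × Int)) {m n : Nat} (h : m ≤ n) :
    (pvOptTable its n).getD m none = pvOpt its m := by
  induction n with
  | zero => interval_cases m; rfl
  | succ n ih =>
      rcases Nat.lt_or_ge m (n + 1) with hm | hm
      · have : (pvOptTable its (n + 1)).getD m none = (pvOptTable its n).getD m none := by
          simp only [pvOptTable, List.getD_eq_getElem?_getD]
          rw [List.getElem?_append_left (by rw [pvOptTable_length]; omega)]
        rw [this, ih (by omega)]
      · have hm' : m = n + 1 := by omega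
        subst hm'
        rfl
theorem pvOpt_zero (its : List (Int × Int)) : pvOpt its 0 = some 0 := by rfl
theorem pvOpt_succ (its : List (Int × Int)) (n : Nat) :
    pvOpt its (n + 1) = pvM (its.map (fun p =>
      if 0 < p.1 ∧ p.1 ≤ (n : Int) + 1 then (pvOpt its (n + 1 - p.1.toNat)).map (fun v => v + p.2) else none)) := by
  have h1 : pvOpt its (n + 1) = pvM (its.map (fun p =>
      if 0 < p.1 ∧ p.1 ≤ (n : Int) + 1 then
        ((pvOptTable its n).getD (n + 1 - p.1.toNat) none).map (fun v => v + p.2) else none)) := by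
    show (pvOptTable its (n+1)).getD (n+1) none = _
    simp only [pvOptTable, List.getD_eq_getElem?_getD]
    rw [List.getElem?_append_right (by rw [pvOptTable_length])]
    simp [pvOptTable_length]
  rw [h1]
  congr 1
  apply List.map_congr_left
  intro p _
  by_cases hg : 0 < p.1 ∧ p.1 ≤ (n : Int) + 1
  · rw [if_pos hg, if_pos hg, pvOptTable_getD its (show n + 1 - p.1.toNat ≤ n by
      have := hg.1; omega)]
  · rw [if_neg hg, if_neg hg]

theorem pvLe_none (a : Option Int) : pvLe a none := by
  cases a <;> trivial

theorem pvMap_min (a b : Option Int) (w : Int) :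
    (pvMin a b).map (fun v => v + w) = pvMin (a.map (fun v => v + w)) (b.map (fun v => v + w)) := by
  cases a <;> cases b <;> simp [pvMin] <;> omega

theorem pvMapAdd_comm (o : Option Int) (a b : Int) :
    (o.map (fun v => v + a)).map (fun v => v + b) = (o.map (fun v => v + b)).map (fun v => v + a) := by
  cases o <;> simp <;> omega

theorem pvOpt_le_rec {its : List (Int × Int)} {p : Int × Int} (hp : p ∈ its) (hpos : 0 < p.1)
    {m : Nat} (hle : p.1 ≤ (m : Int)) :
    pvLe (pvOpt its m) ((pvOpt its (m - p.1.toNat)).map (fun v => v + p.2)) := by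
  cases m with
  | zero =>
      exfalso
      simp only [Nat.cast_zero] at hle
      omega
  | succ m =>
      rw [pvOpt_succ]
      have hg : 0 < p.1 ∧ p.1 ≤ (m : Int) + 1 := by
        constructor
        · exact hpos
        · push_cast at hle; omega
      have hmem : (pvOpt its (m + 1 - p.1.toNat)).map (fun v => v + p.2) ∈
          its.map (fun p => if 0 < p.1 ∧ p.1 ≤ (m : Int) + 1 then
            (pvOpt its (m + 1 - p.1.toNat)).map (fun v => v + p.2) else none) := by
        refine List.mem_map.mpr ⟨p, hp, ?_⟩
        rw [if_pos hg]
      exact pvM_le_of_mem hmem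

theorem pvOpt_mono_append (its : List (Int × Int)) (q : Int × Int) (n : Nat) :
    pvLe (pvOpt (its ++ [q]) n) (pvOpt its n) := by
  induction n using Nat.strong_induction_on with
  | _ n IH =>
    cases n with
    | zero => rw [pvOpt_zero, pvOpt_zero]; exact pvLe_refl _
    | succ m =>
        rw [pvOpt_succ, pvOpt_succ, List.map_append, List.map_singleton, pvM_append_singleton]
        refine pvLe_trans (pvMin_le_left _ _) ?_
        apply pvLe_M
        intro a ha
        rcases List.mem_map.mp ha with ⟨p, hp, rfl⟩
        refine pvLe_trans (pvM_le_of_mem (List.mem_map.mpr ⟨p, hp, rfl⟩)) ?_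
        by_cases hg : 0 < p.1 ∧ p.1 ≤ (m : Int) + 1
        · rw [if_pos hg, if_pos hg]
          exact pvAdd_mono _ (IH _ (by have := hg.1; omega))
        · rw [if_neg hg, if_neg hg]
          exact pvLe_refl _

theorem pvEX (its : List (Int × Int)) (hpos : ∀ p ∈ its, 0 < p.1) (c w : Int) (hc : 0 < c) (n : Nat) :
    pvOpt (its ++ [(c, w)]) n =
      pvMin (pvOpt its n)
        (if c ≤ (n : Int) then (pvOpt (its ++ [(c, w)]) (n - c.toNat)).map (fun v => v + w) else none) := by
  induction n using Nat.strong_induction_on with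
  | _ n IH =>
    cases n with
    | zero =>
        rw [pvOpt_zero, pvOpt_zero, if_neg (by simp; omega), pvMin_none_right]
    | succ m =>
        have hcast : ((m + 1 : Nat) : Int) = (m : Int) + 1 := by push_cast; ring
        rw [pvOpt_succ, pvOpt_succ, List.map_append, List.map_singleton, pvM_append_singleton]
        have hE : (if 0 < c ∧ c ≤ (m : Int) + 1 then
            (pvOpt (its ++ [(c, w)]) (m + 1 - c.toNat)).map (fun v => v + w) else none) =
            (if c ≤ ((m + 1 : Nat) : Int) then
            (pvOpt (its ++ [(c, w)]) (m + 1 - c.toNat)).map (fun v => v + w) else none) := by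
          rw [hcast]
          by_cases h : c ≤ (m : Int) + 1
          · rw [if_pos ⟨hc, h⟩, if_pos h]
          · rw [if_neg (fun hh => h hh.2), if_neg h]
        rw [hE]
        set E := (if c ≤ ((m + 1 : Nat) : Int) then
            (pvOpt (its ++ [(c, w)]) (m + 1 - c.toNat)).map (fun v => v + w) else none) with hEdef
        apply pvLe_antisymm
        · apply pvLe_min
          · apply pvLe_M
            intro a ha
            rcases List.mem_map.mp ha with ⟨p, hp, rfl⟩
            refine pvLe_trans (pvMin_le_left _ _) ?_
            refine pvLe_trans (pvM_le_of_mem (List.mem_map.mpr ⟨p, hp, rfl⟩)) ?_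
            by_cases hg : 0 < p.1 ∧ p.1 ≤ (m : Int) + 1
            · rw [if_pos hg, if_pos hg]
              exact pvAdd_mono _ (pvOpt_mono_append its (c, w) _)
            · rw [if_neg hg, if_neg hg]
              exact pvLe_refl _
          · exact pvMin_le_right _ _
        · apply pvLe_min
          · apply pvLe_M
            intro a ha
            rcases List.mem_map.mp ha with ⟨p, hp, rfl⟩
            by_cases hg : 0 < p.1 ∧ p.1 ≤ (m : Int) + 1
            · rw [if_pos hg]
              have hlt : m + 1 - p.1.toNat < m + 1 := by have := hg.1; omega
              rw [IH _ hlt, pvMap_min]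
              apply pvLe_min
              · refine pvLe_trans (pvMin_le_left _ _) ?_
                refine pvM_le_of_mem (List.mem_map.mpr ⟨p, hp, ?_⟩)
                rw [if_pos hg]
              · by_cases hin : c ≤ ((m + 1 - p.1.toNat : Nat) : Int)
                · rw [if_pos hin]
                  have hp1 : (0:Int) < p.1 := hg.1
                  have hp2 : p.1 ≤ (m : Int) + 1 := hg.2
                  have hcastp : ((m + 1 - p.1.toNat : Nat) : Int) = (m : Int) + 1 - p.1 := by
                    omega
                  have hcm : c ≤ ((m + 1 : Nat) : Int) := by
                    rw [hcast]; rw [hcastp] at hin; omega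
                  refine pvLe_trans (pvMin_le_right _ _) ?_
                  rw [hEdef, if_pos hcm]
                  have hrec : pvLe (pvOpt (its ++ [(c, w)]) (m + 1 - c.toNat))
                      ((pvOpt (its ++ [(c, w)]) ((m + 1 - c.toNat) - p.1.toNat)).map (fun v => v + p.2)) := by
                    apply pvOpt_le_rec (List.mem_append_left _ hp) hg.1
                    rw [hcastp] at hin
                    have : ((m + 1 - c.toNat : Nat) : Int) = (m : Int) + 1 - c := by omega
                    rw [this]; omega
                  refine pvLe_trans (pvAdd_mono w hrec) ?_
                  have hidx : (m + 1 - c.toNat) - p.1.toNat = (m + 1 - p.1.toNat) - c.toNat := by omega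
                  rw [hidx, pvMapAdd_comm]
                  exact pvLe_refl _
                · rw [if_neg hin]
                  simp only [Option.map_none]
                  exact pvLe_none _
            · rw [if_neg hg]
              exact pvLe_none _
          · exact pvMin_le_right _ _

-- ---- the forward pass of A, on a dp list given as a map over range ----
theorem pvSetMap {n : Nat} (h : Nat → Option Int) (k : Nat) (v : Option Int) (hk : k < n) :
    ((List.range n).map h).set k v = (List.range n).map (fun j => if j = k then v else h j) := by
  apply List.ext_getElem
  · simp
  · intro j hj1 hj2
    simp only [List.getElem_set, List.getElem_map, List.getElem_range]
    simp only [List.length_set, List.length_map, List.length_range] at hj1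
    by_cases hjk : k = j
    · simp [hjk]
    · simp [hjk, Ne.symm hjk]

theorem pvGetMap {n : Nat} (h : Nat → Option Int) (i : Int) (h0 : 0 ≤ i) (hn : i < (n : Int)) :
    PySem.List.pyGet? ((List.range n).map h) i = some (h i.toNat) := by
  rw [PySem.List.pyGet?_of_nonneg _ h0]
  have hlt : i.toNat < n := by omega
  simp [hlt]

theorem pvPassA_map (N : Nat) (c f : Int) (hc : 0 ≤ c) (G G' : Nat → Option Int)
    (h1 : ∀ j : Nat, (j : Int) < c → G' j = G j)
    (h2 : ∀ j : Nat, c ≤ (j : Int) →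
      G' j = (match (if 0 < c then G' (j - c.toNat) else G j) with
              | none => G j
              | some v => pvOmin (G j) (v + c + f))) :
    pvPassA (N : Int) c f ((List.range (N + 1)).map G) = (List.range (N + 1)).map G' := by
  have key : ∀ (k : Nat) (a : Int), a = (N : Int) + 1 - (k : Int) → c ≤ a →
      (PySem.List.pyRange a ((N : Int) + 1) 1).foldl
        (fun dp j =>
          match (PySem.List.pyGet? dp (j - c)).join with
          | none => dp
          | some v => dp.set j.toNat (pvOmin (PySem.List.pyGet? dp j).join (v + c + f)))
        ((List.range (N + 1)).map (fun (j : Nat) => if (j : Int) < a then G' j else G j)) =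
      (List.range (N + 1)).map G' := by
    intro k
    induction k with
    | zero =>
        intro a ha _
        rw [ha]
        simp only [Nat.cast_zero, sub_zero]
        rw [PySem.List.pyRange_one_eq_nil (le_refl _), List.foldl_nil]
        apply List.map_congr_left
        intro j hj
        rw [if_pos (by simp at hj; push_cast; omega)]
    | succ k ihk =>
        intro a ha hca
        have ha0 : 0 ≤ a := le_trans hc hca
        have haN : a < (N : Int) + 1 := by push_cast at ha; omega
        have hcast : ((a.toNat : Nat) : Int) = a := Int.toNat_of_nonneg ha0
        rw [PySem.List.pyRange_one_cons haN, List.foldl_cons]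
        have hread : (PySem.List.pyGet? ((List.range (N + 1)).map
              (fun (j : Nat) => if (j : Int) < a then G' j else G j)) (a - c)).join =
            (if 0 < c then G' (a.toNat - c.toNat) else G a.toNat) := by
          rw [pvGetMap _ (a - c) (by omega) (by push_cast; omega)]
          by_cases h0c : 0 < c
          · rw [if_pos h0c]
            have : ((a - c).toNat : Int) < a := by omega
            simp only [Option.join_some, if_pos this]
            congr 1
            omega
          · have hc0 : c = 0 := by omega
            rw [if_neg h0c]
            subst hc0
            have : ¬ (((a - 0).toNat : Int) < a) := by omega
            simp only [Option.join_some, if_neg this]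
            congr 1
            omega
        have hj2 := h2 a.toNat (by omega)
        rw [hread]
        cases hv : (if 0 < c then G' (a.toNat - c.toNat) else G a.toNat) with
        | none =>
            rw [hv] at hj2
            simp only []
            have hmap : (List.range (N + 1)).map (fun (j : Nat) => if (j : Int) < a then G' j else G j) =
                (List.range (N + 1)).map (fun (j : Nat) => if (j : Int) < a + 1 then G' j else G j) := by
              apply List.map_congr_left
              intro j hj
              simp only [List.mem_range] at hj
              by_cases hja : j = a.toNat
              · subst hja
                rw [if_neg (by omega), if_pos (by omega), hj2]
              · by_cases hlt : (j : Int) < a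
                · rw [if_pos hlt, if_pos (by omega)]
                · rw [if_neg hlt, if_neg (by omega)]
            rw [hmap]
            exact ihk (a + 1) (by push_cast at ha ⊢; omega) (by omega)
        | some v =>
            rw [hv] at hj2
            simp only []
            have hmap : ((List.range (N + 1)).map (fun (j : Nat) => if (j : Int) < a then G' j else G j)).set a.toNat
                (pvOmin (PySem.List.pyGet? ((List.range (N + 1)).map
                    (fun (j : Nat) => if (j : Int) < a then G' j else G j)) a).join (v + c + f)) =
                (List.range (N + 1)).map (fun (j : Nat) => if (j : Int) < a + 1 then G' j else G j) := by
              rw [pvGetMap _ a ha0 (by push_cast; omega)]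
              simp only [Option.join_some]
              rw [if_neg (by omega)]
              rw [pvSetMap _ a.toNat _ (by omega)]
              apply List.map_congr_left
              intro j hj
              simp only [List.mem_range] at hj
              by_cases hja : j = a.toNat
              · subst hja
                rw [if_pos rfl, if_pos (by omega), hj2]
              · rw [if_neg hja]
                by_cases hlt : (j : Int) < a
                · rw [if_pos hlt, if_pos (by omega)]
                · rw [if_neg hlt, if_neg (by omega)]
            rw [hmap]
            exact ihk (a + 1) (by push_cast at ha ⊢; omega) (by omega)
  unfold pvPassA
  by_cases hcN : c ≤ (N : Int) + 1
  · have hinit : (List.range (N + 1)).map G =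
        (List.range (N + 1)).map (fun (j : Nat) => if (j : Int) < c then G' j else G j) := by
      apply List.map_congr_left
      intro j hj
      by_cases hlt : (j : Int) < c
      · rw [if_pos hlt, h1 j hlt]
      · rw [if_neg hlt]
    rw [hinit]
    exact key ((N : Int) + 1 - c).toNat c (by omega) (le_refl c)
  · rw [PySem.List.pyRange_one_eq_nil (by omega), List.foldl_nil]
    apply List.map_congr_left
    intro j hj
    simp only [List.mem_range] at hj
    exact (h1 j (by omega)).symm

-- ---- the per-pair invariant of A's outer loop ----
theorem pvItems_append (P : List (Int × Int)) (c f : Int) :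
    pvItems (P ++ [(c, f)]) = pvItems P ++ (if 0 < c then [(c, c + f)] else []) := by
  unfold pvItems
  rw [List.filter_append, List.map_append]
  congr 1
  by_cases hc : 0 < c <;> simp [hc]
theorem pvItems_pos (P : List (Int × Int)) : ∀ p ∈ pvItems P, 0 < p.1 := by
  intro p hp
  rcases List.mem_map.mp hp with ⟨q, hq, rfl⟩
  simpa using (List.mem_filter.mp hq).2
theorem pvZ_append (P : List (Int × Int)) (c f : Int) :
    pvZ (P ++ [(c, f)]) = pvZ P + (if c == 0 then min 0 f else 0) := by
  unfold pvZ
  rw [List.filter_append, List.map_append, List.sum_append]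
  congr 1
  by_cases hc : c = 0 <;> simp [hc]

theorem pvPass_rep (N : Nat) (P : List (Int × Int)) (c f : Int) (hc : 0 ≤ c) :
    pvPassA (N : Int) c f ((List.range (N + 1)).map (pvRep P)) =
      (List.range (N + 1)).map (pvRep (P ++ [(c, f)])) := by
  by_cases h0c : 0 < c
  · apply pvPassA_map N c f hc
    · intro j hj
      unfold pvRep
      rw [pvItems_append, if_pos h0c, pvZ_append, if_neg (by simpa using (by omega : ¬ c = 0))]
      rw [pvEX (pvItems P) (pvItems_pos P) c (c + f) h0c j, if_neg (by omega), pvMin_none_right]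
      simp
    · intro j hj
      rw [if_pos h0c]
      unfold pvRep
      rw [pvItems_append, if_pos h0c, pvZ_append, if_neg (by simpa using (by omega : ¬ c = 0))]
      rw [pvEX (pvItems P) (pvItems_pos P) c (c + f) h0c j, if_pos (by omega)]
      cases hsub : pvOpt (pvItems P ++ [(c, c + f)]) (j - c.toNat) with
      | none =>
          simp only [Option.map_none, pvMin_none_right]
          simp
      | some u =>
          simp only [Option.map_some]
          cases hX : pvOpt (pvItems P) j with
          | none => simp [pvMin, pvOmin]; omega
          | some x => simp [pvMin, pvOmin]; omega
  · have hc0 : c = 0 := by omega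
    subst hc0
    apply pvPassA_map N 0 f hc
    · intro j hj
      omega
    · intro j hj
      rw [if_neg (by omega)]
      unfold pvRep
      rw [pvItems_append, if_neg (by omega), List.append_nil, pvZ_append, if_pos (by simp)]
      cases hX : pvOpt (pvItems P) j with
      | none => simp
      | some x => simp [pvOmin]; omega

theorem pvAfold (N : Nat) (rest P : List (Int × Int)) (hnn : ∀ p ∈ rest, 0 ≤ p.1) :
    rest.foldl (fun dp p => pvPassA (N : Int) p.1 p.2 dp) ((List.range (N + 1)).map (pvRep P)) =
      (List.range (N + 1)).map (pvRep (P ++ rest)) := by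
  induction rest generalizing P with
  | nil => simp
  | cons p rest ih =>
      rw [List.foldl_cons]
      have h1 : pvPassA (N : Int) p.1 p.2 ((List.range (N + 1)).map (pvRep P)) =
          (List.range (N + 1)).map (pvRep (P ++ [p])) := by
        have := pvPass_rep N P p.1 p.2 (hnn p (by simp))
        simpa using this
      rw [h1, ih (P ++ [p]) (fun q hq => hnn q (by simp [hq]))]
      simp

theorem pvAinit (N : Nat) :
    (List.replicate (N + 1) (none : Option Int)).set 0 (some 0) = (List.range (N + 1)).map (pvRep []) := by
  have hrep0 : pvRep [] 0 = some 0 := by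
    unfold pvRep pvZ
    rw [pvOpt_zero]
    simp
  have hrepS : ∀ m : Nat, pvRep [] (m + 1) = none := by
    intro m
    unfold pvRep
    rw [pvOpt_succ]
    simp [pvItems, pvM]
  apply List.ext_getElem
  · simp
  · intro j hj1 hj2
    simp only [List.length_set, List.length_replicate] at hj1
    simp only [List.getElem_set, List.getElem_replicate, List.getElem_map, List.getElem_range]
    cases j with
    | zero => simp [hrep0]
    | succ m => simp [hrepS m]

theorem pvEnumFold (N : Nat) (fees : List Int) :
    ∀ (cs : List Int) (s : Nat) (dp : List (Option Int)), s + cs.length ≤ fees.length →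
      (PySem.List.enumerate cs (s : Int)).foldl
          (fun dp p => pvPassA (N : Int) p.2 ((PySem.List.pyGet? fees p.1).getD 0) dp) dp =
        (cs.zip (fees.drop s)).foldl (fun dp p => pvPassA (N : Int) p.1 p.2 dp) dp := by
  intro cs
  induction cs with
  | nil => intro s dp _; simp [PySem.List.enumerate]
  | cons c cs ih =>
      intro s dp hlen
      rw [PySem.List.enumerate_cons, List.foldl_cons]
      have hs : s < fees.length := by simp at hlen; omega
      have hdrop : fees.drop s = fees[s] :: fees.drop (s + 1) := List.drop_eq_getElem_cons hs
      rw [hdrop, List.zip_cons_cons, List.foldl_cons]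
      have hfee : (PySem.List.pyGet? fees (s : Int)).getD 0 = fees[s] := by
        rw [PySem.List.pyGet?_natCast]
        simp [List.getElem?_eq_getElem hs]
      rw [hfee]
      have hcast : (s : Int) + 1 = ((s + 1 : Nat) : Int) := by push_cast; ring
      rw [hcast, ih (s + 1) _ (by simp at hlen ⊢; omega)]

-- ---- reachability ----
def pvReachTable (cs : List Int) : Nat → List Bool
  | 0 => [true]
  | n + 1 =>
    let t := pvReachTable cs n
    t ++ [cs.any (fun c => decide (0 < c) && decide (c ≤ (n : Int) + 1) && t.getD (n + 1 - c.toNat) false)]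

theorem pvReachTable_length (cs : List Int) (n : Nat) : (pvReachTable cs n).length = n + 1 := by
  induction n with
  | zero => rfl
  | succ n ih => simp [pvReachTable, ih]

theorem pvReach_eq (cs : List Int) (n : Nat) : pvReach cs n = (pvReachTable cs n).getD n false := by
  have key : ∀ m : Nat, (Nat.rec [true] (fun m t =>
      t ++ [cs.any (fun c => decide (c ≤ m + 1) && t.getD (m + 1 - c.toNat) false)]) m : List Bool) =
      pvReachTable cs m := by
    intro m
    induction m with
    | zero => rfl
    | succ m ih =>
        show (Nat.rec [true] (fun m t =>
            t ++ [cs.any (fun c => decide (c ≤ m + 1) && t.getD (m + 1 - c.toNat) false)]) m : List Bool) ++ _ = _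
        rw [ih]
        simp only [pvReachTable]
        congr 1
        congr 1
        apply List.any_congr rfl
        intro c
        by_cases h0c : 0 < c
        · simp [h0c]
        · have hidx : m + 1 - c.toNat = m + 1 := by omega
          rw [hidx, List.getD_eq_default _ _ (by rw [pvReachTable_length])]
          simp [h0c]
  unfold pvReach
  rw [key]

theorem pvReachTable_getD (cs : List Int) {m n : Nat} (h : m ≤ n) :
    (pvReachTable cs n).getD m false = pvReach cs m := by
  induction n with
  | zero => interval_cases m; rw [pvReach_eq]
  | succ n ih =>
      rcases Nat.lt_or_ge m (n + 1) with hm | hm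
      · have : (pvReachTable cs (n + 1)).getD m false = (pvReachTable cs n).getD m false := by
          simp only [pvReachTable, List.getD_eq_getElem?_getD]
          rw [List.getElem?_append_left (by rw [pvReachTable_length]; omega)]
        rw [this, ih (by omega)]
      · have hm' : m = n + 1 := by omega
        subst hm'
        rw [pvReach_eq]
theorem pvReach_succ (cs : List Int) (n : Nat) :
    pvReach cs (n + 1) = cs.any (fun c => decide (0 < c) && decide (c ≤ (n : Int) + 1) && pvReach cs (n + 1 - c.toNat)) := by
  have h1 : pvReach cs (n + 1) = cs.any (fun c => decide (0 < c) && decide (c ≤ (n : Int) + 1) &&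
      (pvReachTable cs n).getD (n + 1 - c.toNat) false) := by
    rw [pvReach_eq]
    simp only [pvReachTable, List.getD_eq_getElem?_getD]
    rw [List.getElem?_append_right (by rw [pvReachTable_length])]
    simp [pvReachTable_length]
  rw [h1]
  congr 1
  funext c
  by_cases hc : 0 < c ∧ c ≤ (n : Int) + 1
  · rw [pvReachTable_getD cs (by have := hc.1; omega)]
  · rcases Decidable.not_and_iff_not_or_not.mp hc with h | h <;> simp [h]

theorem pvReach_iff (coins fees : List Int) (hlen : coins.length ≤ fees.length) (n : Nat) :
    pvReach coins n = true ↔ pvOpt (pvItems (coins.zip fees)) n ≠ none := by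
  induction n using Nat.strong_induction_on with
  | _ n IH =>
    cases n with
    | zero =>
        rw [pvOpt_zero]
        simp [pvReach_eq, pvReachTable]
    | succ m =>
        rw [pvReach_succ, pvOpt_succ]
        rw [List.any_eq_true]
        rw [Ne, pvM_eq_none_iff]
        push_neg
        constructor
        · rintro ⟨c, hc, hh⟩
          simp only [Bool.and_eq_true, decide_eq_true_eq] at hh
          obtain ⟨⟨hc0, hcm⟩, hr⟩ := hh
          have hopt : pvOpt (pvItems (coins.zip fees)) (m + 1 - c.toNat) ≠ none :=
            (IH (m + 1 - c.toNat) (by omega)).mp hr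
          have hz : (coins.zip fees).map Prod.fst = coins := List.map_fst_zip hlen
          have : c ∈ (coins.zip fees).map Prod.fst := by rw [hz]; exact hc
          rcases List.mem_map.mp this with ⟨q, hq, hq1⟩
          rw [← hq1] at hc0 hcm hopt
          have hmem : (q.1, q.1 + q.2) ∈ pvItems (coins.zip fees) := by
            unfold pvItems
            exact List.mem_map.mpr ⟨q, List.mem_filter.mpr ⟨hq, by simpa using hc0⟩, rfl⟩
          refine ⟨_, List.mem_map.mpr ⟨(q.1, q.1 + q.2), hmem, rfl⟩, ?_⟩
          rw [if_pos ⟨hc0, hcm⟩]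
          simp only [Ne, Option.map_eq_none_iff]
          exact hopt
        · rintro ⟨a, ha, hne⟩
          rcases List.mem_map.mp ha with ⟨p, hp, rfl⟩
          have hp0 : 0 < p.1 := pvItems_pos _ p hp
          rcases List.mem_map.mp (by simpa [pvItems] using hp :
              p ∈ ((coins.zip fees).filter (fun p => 0 < p.1)).map (fun p => (p.1, p.1 + p.2))) with
            ⟨q, hq, hqe⟩
          have hq' := List.mem_filter.mp hq
          by_cases hg : 0 < p.1 ∧ p.1 ≤ (m : Int) + 1
          · rw [if_pos hg] at hne
            simp only [Ne, Option.map_eq_none_iff] at hne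
            refine ⟨p.1, ?_, ?_⟩
            · have : q.1 = p.1 := by rw [← hqe]
              rw [← this]
              exact (List.of_mem_zip hq'.1).1
            · simp only [Bool.and_eq_true, decide_eq_true_eq]
              exact ⟨⟨hg.1, hg.2⟩, (IH (m + 1 - p.1.toNat) (by omega)).mpr hne⟩
          · rw [if_neg hg] at hne
            exact absurd rfl hne

-- ---- sums ----
theorem pvSum_neg {l : List Int} (h0 : ∀ x ∈ l, x ≤ 0) (hx : ∃ x ∈ l, x < 0) : l.sum < 0 := by
  induction l with
  | nil => simp at hx
  | cons y l ih =>
      simp only [List.sum_cons]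
      rcases hx with ⟨x, hx, hxneg⟩
      rcases List.mem_cons.mp hx with rfl | hx
      · have hsum : ∀ m : List Int, (∀ x ∈ m, x ≤ 0) → m.sum ≤ 0 := by
          intro m
          induction m with
          | nil => simp
          | cons z m ihm =>
              intro hm
              have := hm z (by simp)
              have := ihm (fun x hx => hm x (by simp [hx]))
              simp only [List.sum_cons]
              omega
        have := hsum l (fun x hx => h0 x (by simp [hx]))
        omega
      · have hy : y ≤ 0 := h0 y (by simp)
        have := ih (fun x hx => h0 x (by simp [hx])) ⟨x, hx, hxneg⟩
        omega

-- ---- port A, evaluated ----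
theorem pvA_val (coins fees : List Int) (amount : Int)
    (hpre : Pre_coin_change_with_fees coins fees amount) :
    coin_change_with_fees coins fees amount =
      (match pvRep (coins.zip fees) amount.toNat with
       | some v => v
       | none => -1) := by
  obtain ⟨ha, hlen, hcs⟩ := hpre
  have hamt : amount = (amount.toNat : Int) := (Int.toNat_of_nonneg ha).symm
  set N := amount.toNat with hN
  simp only [coin_change_with_fees]
  have hlen0 : (amount + 1).toNat = N + 1 := by omega
  rw [hlen0, pvAinit N, hamt]
  have he := pvEnumFold N fees coins 0 ((List.range (N + 1)).map (pvRep [])) (by simpa using hlen)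
  simp only [Nat.cast_zero, List.drop_zero] at he
  rw [he]
  have hnn : ∀ p ∈ coins.zip fees, 0 ≤ p.1 := by
    intro p hp
    exact hcs p.1 (List.of_mem_zip (by simpa using hp)).1
  have hf := pvAfold N (coins.zip fees) [] hnn
  simp only [List.nil_append] at hf
  rw [hf]
  rw [pvGetMap (n := N + 1) (pvRep (coins.zip fees)) (N : Int) (by omega) (by push_cast; omega)]
  simp only [Option.join_some, Int.toNat_natCast]

-- ===== B-side machinery: the stack machine computes pvOpt =====

def pvVal (its : List (Int × Int)) (k : Int) : Option Int :=
  if 0 ≤ k then pvOpt its k.toNat else none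

-- every memo entry is correct, and 0 is memoized
def pvGood (its : List (Int × Int)) (m : PySem.Dict Int (Option Int)) : Prop :=
  (∀ k v, m.get? k = some v → v = pvVal its k) ∧ (m.get? 0).isSome = true

-- stack invariant: for every expanded entry, each of its sub-amounts is memoized or
-- sits strictly above it on the stack (A = the values above the current segment)
def pvInvS (its : List (Int × Int)) (m : PySem.Dict Int (Option Int)) :
    List (Int × Bool) → List Int → Prop
  | [], _ => True
  | e :: rest, A =>
    (e.2 = true → ∀ p ∈ its, p.1 ≤ e.1 → (m.get? (e.1 - p.1)).isSome = true ∨ (e.1 - p.1) ∈ A) ∧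
    pvInvS its m rest (e.1 :: A)

def pvW (its : List (Int × Int)) (e : Int × Bool) : Nat := if e.2 then 1 else pvPsi its e.1

def pvMsum (its : List (Int × Int)) (S : List (Int × Bool)) : Nat := (S.map (pvW its)).sum

theorem pvPsiTable_length (its : List (Int × Int)) (n : Nat) : (pvPsiTable its n).length = n + 1 := by
  induction n with
  | zero => rfl
  | succ n ih => simp [pvPsiTable, ih]

theorem pvPsiTable_getD (its : List (Int × Int)) {m n : Nat} (h : m ≤ n) :
    (pvPsiTable its n).getD m 0 = pvPsi its (m : Int) := by
  induction n with
  | zero =>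
      interval_cases m
      simp [pvPsi]
  | succ n ih =>
      rcases Nat.lt_or_ge m (n + 1) with hm | hm
      · have : (pvPsiTable its (n + 1)).getD m 0 = (pvPsiTable its n).getD m 0 := by
          simp only [pvPsiTable, List.getD_eq_getElem?_getD]
          rw [List.getElem?_append_left (by rw [pvPsiTable_length]; omega)]
        rw [this, ih (by omega)]
      · have hm' : m = n + 1 := by omega
        subst hm'
        unfold pvPsi
        rw [if_pos (by positivity)]
        simp

theorem pvPsi_eq (its : List (Int × Int)) (rem : Int) :
    pvPsi its rem = 2 + ((its.filter (fun p => decide (0 < p.1) && decide (p.1 ≤ rem))).map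
        (fun p => pvPsi its (rem - p.1))).sum := by
  by_cases h0 : 0 ≤ rem
  · obtain ⟨k, hk⟩ : ∃ k : Nat, rem = (k : Int) := ⟨rem.toNat, by omega⟩
    subst hk
    cases k with
    | zero =>
        have hf : (its.filter (fun p => decide (0 < p.1) && decide (p.1 ≤ ((0:Nat) : Int)))) = [] := by
          rw [List.filter_eq_nil_iff]
          intro p _
          simp only [Bool.and_eq_true, decide_eq_true_eq, not_and]
          intro hp
          omega
        rw [hf]
        simp [pvPsi, pvPsiTable]
    | succ n =>
        have h1 : pvPsi its ((n + 1 : Nat) : Int) = 2 +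
            ((its.filter (fun p => decide (0 < p.1) && decide (p.1 ≤ (n : Int) + 1))).map
              (fun p => (pvPsiTable its n).getD (n + 1 - p.1.toNat) 0)).sum := by
          unfold pvPsi
          rw [if_pos (by positivity)]
          simp only [Int.toNat_natCast, pvPsiTable, List.getD_eq_getElem?_getD]
          rw [List.getElem?_append_right (by rw [pvPsiTable_length])]
          simp [pvPsiTable_length]
        rw [h1]
        have hcast : ((n + 1 : Nat) : Int) = (n : Int) + 1 := by push_cast; ring
        rw [hcast]
        congr 1
        refine congrArg List.sum (List.map_congr_left ?_)
        intro p hp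
        have hmem := List.mem_filter.mp hp
        simp only [Bool.and_eq_true, decide_eq_true_eq] at hmem
        obtain ⟨-, hp0, hple⟩ := hmem
        rw [pvPsiTable_getD its (show n + 1 - p.1.toNat ≤ n by omega)]
        congr 1
        omega
  · have hf : (its.filter (fun p => decide (0 < p.1) && decide (p.1 ≤ rem))) = [] := by
      rw [List.filter_eq_nil_iff]
      intro p _
      simp only [Bool.and_eq_true, decide_eq_true_eq, not_and]
      intro hp
      omega
    rw [hf]
    simp [pvPsi, h0]

theorem pvPsi_pos (its : List (Int × Int)) (rem : Int) : 2 ≤ pvPsi its rem := by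
  rw [pvPsi_eq]; omega

theorem pvW_pos (its : List (Int × Int)) (e : Int × Bool) : 1 ≤ pvW its e := by
  unfold pvW
  split
  · exact le_refl 1
  · exact le_trans (by omega) (pvPsi_pos its e.1)

theorem pvEnsure_cons (its : List (Int × Int)) (fuel : Nat) (rem : Int) (expanded : Bool)
    (stack : List (Int × Bool)) (memo : PySem.Dict Int (Option Int)) :
    pvEnsure its (fuel + 1) ((rem, expanded) :: stack) memo =
      if (memo.get? rem).isSome then
        pvEnsure its fuel stack memo
      else if expanded = false then
        pvEnsure its fuel
          ((its.filterMap (fun p =>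
              if p.1 ≤ rem ∧ (memo.get? (rem - p.1)).isNone then some (rem - p.1, false) else none)).reverse
            ++ (rem, true) :: stack) memo
      else
        pvEnsure its fuel stack (memo.insert rem (pvBest its rem memo)) := rfl

theorem pvInvS_mono {its : List (Int × Int)} {m m' : PySem.Dict Int (Option Int)}
    (hm : ∀ k, (m.get? k).isSome = true → (m'.get? k).isSome = true) :
    ∀ {S : List (Int × Bool)} {A A' : List Int},
      (∀ x ∈ A, x ∈ A' ∨ (m'.get? x).isSome = true) →
      pvInvS its m S A → pvInvS its m' S A' := by
  intro S
  induction S with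
  | nil => intro A A' _ _; trivial
  | cons e rest ih =>
      intro A A' hA hI
      refine ⟨?_, ?_⟩
      · intro he p hp hple
        rcases hI.1 he p hp hple with h | h
        · exact Or.inl (hm _ h)
        · rcases hA _ h with h' | h'
          · exact Or.inr h'
          · exact Or.inl h'
      · refine ih ?_ hI.2
        intro x hx
        rcases List.mem_cons.mp hx with rfl | hx
        · exact Or.inl (List.mem_cons_self)
        · rcases hA x hx with h | h
          · exact Or.inl (List.mem_cons_of_mem _ h)
          · exact Or.inr h

-- prepending a segment of unexpanded entries to the stack
theorem pvInvS_append_false {its : List (Int × Int)} {m : PySem.Dict Int (Option Int)} :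
    ∀ {L rest : List (Int × Bool)} {A : List Int}, (∀ e ∈ L, e.2 = false) →
      pvInvS its m rest (L.foldl (fun a e => e.1 :: a) A) → pvInvS its m (L ++ rest) A := by
  intro L
  induction L with
  | nil => intro rest A _ h; exact h
  | cons e L ih =>
      intro rest A hf h
      refine ⟨?_, ?_⟩
      · intro he
        rw [hf e (by simp)] at he
        cases he
      · exact ih (fun x hx => hf x (by simp [hx])) h

theorem pvFoldl_cons_mem (L : List (Int × Bool)) (A : List Int) (x : Int) :
    x ∈ L.foldl (fun a e => e.1 :: a) A ↔ x ∈ L.map Prod.fst ∨ x ∈ A := by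
  induction L generalizing A with
  | nil => simp
  | cons e L ih =>
      rw [List.foldl_cons, ih]
      simp [or_assoc, or_comm, or_left_comm]

theorem pvGet_insert_isSome {m : PySem.Dict Int (Option Int)} {k k' : Int} {v : Option Int}
    (h : (m.get? k').isSome = true) : ((m.insert k v).get? k').isSome = true := by
  rw [PySem.Dict.get?_insert]
  split
  · rfl
  · exact h

-- the pending children cost no more than all children
theorem pvPending_sum_le (its : List (Int × Int)) (rem : Int) (m : PySem.Dict Int (Option Int)) :
    ∀ (l : List (Int × Int)), (∀ p ∈ l, 0 < p.1) →
    (((l.filterMap (fun p =>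
        if p.1 ≤ rem ∧ (m.get? (rem - p.1)).isNone then some (rem - p.1, false) else none))).map
          (pvW its)).sum ≤
      ((l.filter (fun p => decide (0 < p.1) && decide (p.1 ≤ rem))).map
        (fun p => pvPsi its (rem - p.1))).sum := by
  intro l
  induction l with
  | nil => intro _; simp
  | cons q l ih =>
      intro hpos
      have hq : 0 < q.1 := hpos q (by simp)
      have ih' := ih (fun p hp => hpos p (by simp [hp]))
      rw [List.filterMap_cons, List.filter_cons]
      by_cases hle : q.1 ≤ rem
      · have hfil : (decide (0 < q.1) && decide (q.1 ≤ rem)) = true := by simp [hq, hle]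
        by_cases hn : (m.get? (rem - q.1)).isNone = true
        · rw [if_pos (show q.1 ≤ rem ∧ (m.get? (rem - q.1)).isNone = true from ⟨hle, hn⟩),
            if_pos hfil]
          simp only [List.map_cons, List.sum_cons]
          have hw : pvW its (rem - q.1, false) = pvPsi its (rem - q.1) := rfl
          rw [hw]
          omega
        · rw [if_neg (show ¬ (q.1 ≤ rem ∧ (m.get? (rem - q.1)).isNone = true) from fun hh => hn hh.2),
            if_pos hfil]
          simp only [List.map_cons, List.sum_cons]
          have := pvPsi_pos its (rem - q.1)
          omega
      · rw [if_neg (show ¬ (q.1 ≤ rem ∧ (m.get? (rem - q.1)).isNone = true) from fun hh => hle hh.1),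
          if_neg (by simp [hle])]
        exact ih'

theorem pvMin_assoc (a b c : Option Int) : pvMin (pvMin a b) c = pvMin a (pvMin b c) := by
  cases a <;> cases b <;> cases c <;> simp [pvMin, min_assoc]

-- B's best-candidate fold is the ordered min over the candidate list
theorem pvBest_step (rem : Int) (m : PySem.Dict Int (Option Int)) (p : Int × Int) (acc : Option Int) :
    (if p.1 ≤ rem then
      match (m.get? (rem - p.1)).join with
      | none => acc
      | some s =>
        match acc with
        | none => some (s + p.2)
        | some b => if s + p.2 < b then some (s + p.2) else acc
    else acc) =
    pvMin acc (if p.1 ≤ rem then ((m.get? (rem - p.1)).join).map (fun v => v + p.2) else none) := by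
  by_cases hle : p.1 ≤ rem
  · rw [if_pos hle, if_pos hle]
    cases (m.get? (rem - p.1)).join with
    | none => cases acc <;> simp [pvMin]
    | some s =>
        cases acc with
        | none => simp [pvMin]
        | some b =>
            simp only [Option.map_some, pvMin]
            by_cases hlt : s + p.2 < b
            · rw [if_pos hlt]
              congr 1
              omega
            · rw [if_neg hlt]
              congr 1
              omega
  · rw [if_neg hle, if_neg hle, pvMin_none_right]

theorem pvBest_foldl (its : List (Int × Int)) (rem : Int) (m : PySem.Dict Int (Option Int)) :
    pvBest its rem m = pvM (its.map (fun p =>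
      if p.1 ≤ rem then ((m.get? (rem - p.1)).join).map (fun v => v + p.2) else none)) := by
  unfold pvBest
  have key : ∀ (l : List (Int × Int)) (acc : Option Int),
      l.foldl (fun best p =>
        if p.1 ≤ rem then
          match (m.get? (rem - p.1)).join with
          | none => best
          | some s =>
            match best with
            | none => some (s + p.2)
            | some b => if s + p.2 < b then some (s + p.2) else best
        else best) acc =
      pvMin acc (pvM (l.map (fun p =>
        if p.1 ≤ rem then ((m.get? (rem - p.1)).join).map (fun v => v + p.2) else none))) := by
    intro l
    induction l with
    | nil => intro acc; simp [pvM, pvMin_none_right]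
    | cons p l ih =>
        intro acc
        rw [List.foldl_cons, ih, List.map_cons]
        have hM : pvM ((if p.1 ≤ rem then ((m.get? (rem - p.1)).join).map (fun v => v + p.2) else none) ::
            l.map (fun p => if p.1 ≤ rem then ((m.get? (rem - p.1)).join).map (fun v => v + p.2) else none)) =
            pvMin (if p.1 ≤ rem then ((m.get? (rem - p.1)).join).map (fun v => v + p.2) else none)
              (pvM (l.map (fun p => if p.1 ≤ rem then ((m.get? (rem - p.1)).join).map (fun v => v + p.2) else none))) := rfl
        rw [hM, ← pvMin_assoc]
        congr 1
        exact pvBest_step rem m p acc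
  rw [key]
  rfl

theorem pvBest_eq (its : List (Int × Int)) (hpos : ∀ p ∈ its, 0 < p.1)
    (rem : Int) (m : PySem.Dict Int (Option Int)) (hgood : pvGood its m)
    (hch : ∀ p ∈ its, p.1 ≤ rem → (m.get? (rem - p.1)).isSome = true)
    (hrem : rem ≠ 0) :
    pvBest its rem m = pvVal its rem := by
  rw [pvBest_foldl]
  by_cases h0 : 0 ≤ rem
  · have hpos' : 0 < rem := lt_of_le_of_ne h0 (Ne.symm hrem)
    obtain ⟨n, hn⟩ : ∃ n : Nat, rem.toNat = n + 1 := ⟨rem.toNat - 1, by omega⟩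
    have hcast : (n : Int) + 1 = rem := by omega
    unfold pvVal
    rw [if_pos h0, hn, pvOpt_succ]
    congr 1
    apply List.map_congr_left
    intro p hp
    have hp0 : 0 < p.1 := hpos p hp
    by_cases hle : p.1 ≤ rem
    · rw [if_pos hle, if_pos ⟨hp0, by omega⟩]
      have hsome := hch p hp hle
      obtain ⟨v, hv⟩ := Option.isSome_iff_exists.mp hsome
      rw [hv]
      have hvv := hgood.1 _ _ hv
      unfold pvVal at hvv
      rw [if_pos (by omega : (0:Int) ≤ rem - p.1)] at hvv
      have hidx : (rem - p.1).toNat = n + 1 - p.1.toNat := by omega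
      rw [hvv, hidx]
      rfl
    · rw [if_neg hle, if_neg (fun hh => hle (by omega))]
  · unfold pvVal
    rw [if_neg h0]
    rw [pvM_eq_none_iff]
    intro a ha
    rcases List.mem_map.mp ha with ⟨p, hp, rfl⟩
    rw [if_neg (by have := hpos p hp; omega)]

-- master lemma for B's while loop
theorem pvEnsure_spec (its : List (Int × Int)) (hpos : ∀ p ∈ its, 0 < p.1) :
    ∀ (fuel : Nat) (S : List (Int × Bool)) (m : PySem.Dict Int (Option Int)),
      pvGood its m → pvInvS its m S [] → pvMsum its S < fuel →
      pvGood its (pvEnsure its fuel S m) ∧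
      (∀ k, (m.get? k).isSome = true → ((pvEnsure its fuel S m).get? k).isSome = true) ∧
      (∀ e ∈ S, ((pvEnsure its fuel S m).get? e.1).isSome = true) := by
  intro fuel
  induction fuel with
  | zero => intro S m _ _ h; omega
  | succ fuel ih =>
      intro S m hgood hinv hms
      cases S with
      | nil =>
          refine ⟨hgood, ?_, ?_⟩
          · intro k hk; exact hk
          · intro e he; cases he
      | cons e tail =>
          obtain ⟨rem, expanded⟩ := e
          have hw1 := pvW_pos its (rem, expanded)
          have hmt : pvMsum its tail < fuel := by
            unfold pvMsum at hms ⊢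
            simp only [List.map_cons, List.sum_cons] at hms
            omega
          by_cases hsome : (m.get? rem).isSome = true
          · rw [show pvEnsure its (fuel + 1) ((rem, expanded) :: tail) m =
                pvEnsure its fuel tail m by rw [pvEnsure_cons, if_pos hsome]]
            have hinvt : pvInvS its m tail [] := by
              refine pvInvS_mono (fun k hk => hk) ?_ hinv.2
              intro x hx
              rcases List.mem_cons.mp hx with rfl | hx
              · exact Or.inr hsome
              · cases hx
            obtain ⟨g', mono', all'⟩ := ih tail m hgood hinvt hmt
            exact ⟨g', mono', fun e he => by
              rcases List.mem_cons.mp he with rfl | he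
              · exact mono' rem hsome
              · exact all' e he⟩
          · have hsome' : (m.get? rem).isSome = false := by
              cases h : (m.get? rem).isSome
              · rfl
              · exact absurd h hsome
            cases expanded with
            | false =>
                -- expansion step
                set P := its.filterMap (fun p =>
                  if p.1 ≤ rem ∧ (m.get? (rem - p.1)).isNone then some (rem - p.1, false) else none) with hP
                have hstep : pvEnsure its (fuel + 1) ((rem, false) :: tail) m =
                    pvEnsure its fuel (P.reverse ++ (rem, true) :: tail) m := by
                  rw [pvEnsure_cons, if_neg (by simp [hsome']), if_pos rfl]
                rw [hstep]
                have hPf : ∀ e ∈ P.reverse, e.2 = false := by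
                  intro e he
                  rw [List.mem_reverse] at he
                  rcases List.mem_filterMap.mp he with ⟨p, _, hpe⟩
                  split at hpe
                  · cases hpe; rfl
                  · cases hpe
                have hinv' : pvInvS its m (P.reverse ++ (rem, true) :: tail) [] := by
                  apply pvInvS_append_false hPf
                  refine ⟨?_, ?_⟩
                  · intro _ p hp hple
                    by_cases hn : (m.get? (rem - p.1)).isNone
                    · refine Or.inr ?_
                      rw [pvFoldl_cons_mem]
                      refine Or.inl ?_
                      rw [List.map_reverse, List.mem_reverse]
                      refine List.mem_map.mpr ⟨(rem - p.1, false), ?_, rfl⟩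
                      exact List.mem_filterMap.mpr ⟨p, hp, by rw [if_pos ⟨hple, hn⟩]⟩
                    · exact Or.inl (by cases h : (m.get? (rem - p.1)) <;> simp [h, Option.isNone] at hn ⊢)
                  · refine pvInvS_mono (fun k hk => hk) ?_ hinv.2
                    intro x hx
                    rcases List.mem_cons.mp hx with rfl | hx
                    · exact Or.inl (by simp)
                    · cases hx
                have hmsum' : pvMsum its (P.reverse ++ (rem, true) :: tail) < fuel := by
                  unfold pvMsum at hms ⊢
                  rw [List.map_append, List.sum_append, List.map_reverse, List.sum_reverse]
                  simp only [List.map_cons, List.sum_cons] at hms ⊢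
                  have hb := pvPending_sum_le its rem m its hpos
                  rw [← hP] at hb
                  have hpsi := pvPsi_eq its rem
                  have hwfalse : pvW its (rem, false) = pvPsi its rem := rfl
                  rw [hwfalse] at hms
                  have hwtrue : pvW its (rem, true) = 1 := rfl
                  rw [hwtrue]
                  omega
                obtain ⟨g', mono', all'⟩ := ih _ m hgood hinv' hmsum'
                refine ⟨g', mono', ?_⟩
                intro e he
                rcases List.mem_cons.mp he with rfl | he
                · exact all' (rem, true) (by simp)
                · exact all' e (by simp [he])
            | true =>
                -- memoize step
                have hch : ∀ p ∈ its, p.1 ≤ rem → (m.get? (rem - p.1)).isSome = true := by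
                  intro p hp hple
                  rcases hinv.1 rfl p hp hple with h | h
                  · exact h
                  · cases h
                have hrem0 : rem ≠ 0 := by
                  intro h
                  rw [h] at hsome'
                  rw [hgood.2] at hsome'
                  cases hsome'
                set m' := m.insert rem (pvBest its rem m) with hm'
                have hstep : pvEnsure its (fuel + 1) ((rem, true) :: tail) m =
                    pvEnsure its fuel tail m' := by
                  rw [pvEnsure_cons, if_neg (by simp [hsome']), if_neg (by simp)]
                rw [hstep]
                have hbest : pvBest its rem m = pvVal its rem :=
                  pvBest_eq its hpos rem m hgood hch hrem0
                have hgood' : pvGood its m' := by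
                  constructor
                  · intro k v hk
                    rw [hm', PySem.Dict.get?_insert] at hk
                    split at hk
                    · rename_i hkr
                      cases hk
                      rw [hbest, hkr]
                    · exact hgood.1 _ _ hk
                  · exact pvGet_insert_isSome hgood.2
                have hmono0 : ∀ k, (m.get? k).isSome = true → (m'.get? k).isSome = true :=
                  fun k hk => pvGet_insert_isSome hk
                have hremin : (m'.get? rem).isSome = true := by
                  rw [hm', PySem.Dict.get?_insert_self]
                  rfl
                have hinvt : pvInvS its m' tail [] := by
                  refine pvInvS_mono hmono0 ?_ hinv.2
                  intro x hx
                  rcases List.mem_cons.mp hx with rfl | hx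
                  · exact Or.inr hremin
                  · cases hx
                obtain ⟨g', mono', all'⟩ := ih tail m' hgood' hinvt hmt
                refine ⟨g', fun k hk => mono' k (hmono0 k hk), ?_⟩
                intro e he
                rcases List.mem_cons.mp he with rfl | he
                · exact mono' rem hremin
                · exact all' e he

-- ---- port B, evaluated ----
theorem pvB_val (coins fees : List Int) (amount : Int)
    (hpre : Pre_coin_change_with_fees coins fees amount) :
    coin_change_with_fees_alt coins fees amount =
      (match pvOpt (pvItems (coins.zip fees)) amount.toNat with
       | some v => v
       | none => -1) := by
  obtain ⟨ha, hlen, hcs⟩ := hpre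
  simp only [coin_change_with_fees_alt]
  set its := ((coins.zip fees).filter (fun p => 0 < p.1)).map (fun p => (p.1, p.1 + p.2)) with hits
  have hitseq : its = pvItems (coins.zip fees) := rfl
  have hpos : ∀ p ∈ its, 0 < p.1 := by rw [hitseq]; exact pvItems_pos _
  set m0 := ((PySem.Dict.empty : PySem.Dict Int (Option Int)).insert 0 (some 0)) with hm0
  have hgood0 : pvGood its m0 := by
    constructor
    · intro k v hk
      rw [hm0, PySem.Dict.get?_insert] at hk
      split at hk
      · rename_i hk0
        cases hk
        rw [hk0]
        unfold pvVal
        rw [if_pos (le_refl 0)]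
        rw [show (0:Int).toNat = 0 from rfl, pvOpt_zero]
      · rw [PySem.Dict.get?_empty] at hk
        cases hk
    · rw [hm0, PySem.Dict.get?_insert_self]
      rfl
  have hinv0 : pvInvS its m0 [(amount, false)] [] := ⟨(fun h => nomatch h), trivial⟩
  have hms0 : pvMsum its [(amount, false)] < pvPsi its amount + 1 := by
    unfold pvMsum
    simp only [List.map_cons, List.map_nil, List.sum_cons, List.sum_nil]
    have : pvW its (amount, false) = pvPsi its amount := rfl
    omega
  obtain ⟨hg, _, hall⟩ := pvEnsure_spec its hpos (pvPsi its amount + 1) [(amount, false)] m0 hgood0 hinv0 hms0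
  have hsome := hall (amount, false) (by simp)
  obtain ⟨v, hv⟩ := Option.isSome_iff_exists.mp hsome
  rw [hv]
  have hvv := hg.1 _ _ hv
  unfold pvVal at hvv
  rw [if_pos ha] at hvv
  rw [hvv, hitseq]
  cases pvOpt (pvItems (coins.zip fees)) amount.toNat <;> rfl

theorem pvZ_zero {coins fees : List Int} (h : ¬ ∃ p ∈ coins.zip fees, p.1 = 0 ∧ p.2 < 0) :
    pvZ (coins.zip fees) = 0 := by
  unfold pvZ
  apply List.sum_eq_zero
  intro x hx
  rcases List.mem_map.mp hx with ⟨p, hp, rfl⟩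
  have h1 := (List.mem_filter.mp hp).1
  have h2 := (List.mem_filter.mp hp).2
  have hz : p.1 = 0 := by simpa using h2
  have : ¬ p.2 < 0 := fun hneg => h ⟨p, h1, hz, hneg⟩
  omega

theorem pvZ_neg {coins fees : List Int} (h : ∃ p ∈ coins.zip fees, p.1 = 0 ∧ p.2 < 0) :
    pvZ (coins.zip fees) < 0 := by
  unfold pvZ
  rcases h with ⟨p, hp, hz, hneg⟩
  apply pvSum_neg
  · intro x hx
    rcases List.mem_map.mp hx with ⟨q, _, rfl⟩
    omega
  · refine ⟨min 0 p.2, List.mem_map.mpr ⟨p, List.mem_filter.mpr ⟨hp, by simp [hz]⟩, rfl⟩, by omega⟩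

-- ===== VERDICT (by name: the statement is the Claim_ definition above) =====
theorem coin_change_with_fees_spec : Claim_unchanged_coin_change_with_fees := by
  intro coins fees amount _ hpre
  intro hnd
  rw [pvA_val coins fees amount hpre, pvB_val coins fees amount hpre]
  unfold pvRep
  by_cases hr : pvReach coins amount.toNat = true
  · have hz : pvZ (coins.zip fees) = 0 := by
      apply pvZ_zero
      intro hex
      exact hnd ⟨hex, hr⟩
    rw [hz]
    cases pvOpt (pvItems (coins.zip fees)) amount.toNat with
    | none => rfl
    | some v => simp
  · have : pvOpt (pvItems (coins.zip fees)) amount.toNat = none := by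
      by_contra hne
      exact hr ((pvReach_iff coins fees hpre.2.1 amount.toNat).mpr hne)
    rw [this]
    rfl

theorem coin_change_with_fees_changed : Claim_changed_coin_change_with_fees := by
  unfold Claim_changed_coin_change_with_fees; decide

theorem coin_change_with_fees_tight : Claim_exact_coin_change_with_fees := by
  intro coins fees amount _ hpre hd
  rw [pvA_val coins fees amount hpre, pvB_val coins fees amount hpre]
  unfold pvRep
  obtain ⟨hzn, hr⟩ := hd
  have hz : pvZ (coins.zip fees) < 0 := pvZ_neg hzn
  have : pvOpt (pvItems (coins.zip fees)) amount.toNat ≠ none :=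
    (pvReach_iff coins fees hpre.2.1 amount.toNat).mp hr
  cases hv : pvOpt (pvItems (coins.zip fees)) amount.toNat with
  | none => exact absurd hv this
  | some v => simp; omega
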